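-- pv_equiv track=rewrite | github.com/shbaek1997/baekjoon-practice | Programmers_rotate_array_outline.py | solution
-- ===== SOURCE A (Python) =====
-- def solution(rows, columns, queries):
--     # 답을 담을 ans 배열
--     ans = []
--     # rows, columns로 기본 배열 생성
--     grid = [[0]*columns for _ in range(rows)]
--     for i in range(rows*columns):
--         grid[i//columns][i % columns] = i+1
--
--     # 문제 해결
--     for q in queries:
--         b = q[0]-1  # y-index low
--         l = q[1]-1  # x-indx low
--         t = q[2]-1  # y-index high
--         r = q[3]-1  # x-index high
--
--         # 테두리의 둘레 계산
--         length = t-b+1+r-l+1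
--         length = length*2-4
--
--         # 전의 값 기록
--         prev = grid[b][l]
--         # 처음으로 사용할 x,y 값
--         x = l
--         y = b
--         # 움직이는 숫자 중 가장 작은 숫자를 찾기 위한 변수 설정
--         min_num = 100001
--         # 테두리 길이 만큼 반복
--         for i in range(1, length+1):
--             # 인덱스 값 변경
--             # 오른쪽으로 이동
--             if x < r and y == b:
--                 x += 1
--             # 아래로 이동
--             elif x == r and y < t:
--                 y += 1
--             # 왼쪽으로 이동
--             elif y == t and x > l:
--                 x -= 1
--             # 위로 이동
--             elif x == l and y > b:
--                 y -= 1
--             # 현재값 확인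
--             curr = grid[y][x]
--             # 최솟값 업데이트
--             min_num = min(curr, min_num)
--             # 직전 값과 현재 값 교환
--             prev, curr = curr, prev
--             grid[y][x] = curr
--         ans.append(min_num)
--     return ans
-- ===== SOURCE B (Python) =====
-- def solution(rows, columns, queries):
--     ans = []
--     grid = [[0] * columns for _ in range(rows)]
--     for i in range(rows * columns):
--         grid[i // columns][i % columns] = i + 1
--
--     for q in queries:
--         b, l, t, r = q[0] - 1, q[1] - 1, q[2] - 1, q[3] - 1
--         # ordered perimeter coordinates, clockwise, starting after the top-left corner
--         coords = [(b, x) for x in range(l + 1, r + 1)]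
--         coords += [(y, r) for y in range(b + 1, t + 1)]
--         coords += [(t, x) for x in range(r - 1, l - 1, -1)]
--         coords += [(y, l) for y in range(t - 1, b - 1, -1)]
--         vals = [grid[y][x] for y, x in coords]
--         ans.append(min(vals + [100001]))
--         # rotate: every border cell receives its predecessor's old value
--         rot = vals[-1:] + vals[:-1]
--         for (y, x), v in zip(coords, rot):
--             grid[y][x] = v
--     return ans
-- ===== Notes on version B (the rewrite author's own statement) =====
-- stated objective: simpler
-- what changed: Replaces A's per-step directional state machine (with prev/curr swapping inside the walk) by explicitly building the perimeter coordinate list from four range segments, then a separate gather pass (read border values, take the min) and a scatter pass (write the values rotated by one).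
-- outside the precondition, e.g. on solution(2, 3, [[1, 1, 1, 3], [1, 1, 2, 3]]): A returns [1, 1], B returns [1, 2]; on solution(3, 3, [[0, 0, 2, 2]]): A returns [2], B returns [2]
import Mathlib
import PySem

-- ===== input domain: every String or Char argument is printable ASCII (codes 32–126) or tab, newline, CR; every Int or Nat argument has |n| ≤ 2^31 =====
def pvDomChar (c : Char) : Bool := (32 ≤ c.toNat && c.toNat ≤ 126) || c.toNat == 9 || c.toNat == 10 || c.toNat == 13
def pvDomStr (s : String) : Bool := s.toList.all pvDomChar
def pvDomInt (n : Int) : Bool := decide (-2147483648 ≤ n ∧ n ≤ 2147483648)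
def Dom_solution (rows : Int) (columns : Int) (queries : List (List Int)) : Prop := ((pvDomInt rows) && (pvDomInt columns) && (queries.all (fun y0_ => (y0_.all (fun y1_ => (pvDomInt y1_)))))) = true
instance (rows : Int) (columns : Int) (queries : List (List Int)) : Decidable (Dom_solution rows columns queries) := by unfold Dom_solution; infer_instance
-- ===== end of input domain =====

-- B replaces A's directional state machine by an explicit perimeter coordinate list with
-- separate gather (min) and scatter (rotate) passes; same asymptotic cost (objective: simpler).
-- Both Pythons build the number grid the same way; under Pre_ every index they use is
-- nonnegative and in range, so the getD/set-based pvGet2/pvSet2 helpers are exact there.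

-- ===== PORT A =====
-- grid[y][x] (read), exact for the nonnegative in-range indices guaranteed by Pre_
def pvGet2 (g : Array (Array Int)) (y x : Int) : Int := (g.getD y.toNat #[]).getD x.toNat 0

-- grid[y][x] = v (assignment), exact for the nonnegative in-range indices guaranteed by Pre_
def pvSet2 (g : Array (Array Int)) (y x : Int) (v : Int) : Array (Array Int) :=
  g.modify y.toNat (fun row => row.setIfInBounds x.toNat v)

-- grid = [[0]*columns for _ in range(rows)]; for i in range(rows*columns): grid[i//columns][i%columns] = i+1
-- (identical in both Pythons, so shared by both ports)
def pvBuildGrid (rows columns : Int) : Array (Array Int) :=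
  (PySem.List.pyRange 0 (rows * columns) 1).foldl
    (fun g i => pvSet2 g (PySem.Int.floordiv i columns) (PySem.Int.mod i columns) (i + 1))
    ((PySem.List.pyRange 0 rows 1).map (fun _ => Array.replicate columns.toNat 0)).toArray

-- A's if/elif chain updating (x, y)
def pvMove (l b t r x y : Int) : Int × Int :=
  if x < r ∧ y = b then (x + 1, y)
  else if x = r ∧ y < t then (x, y + 1)
  else if y = t ∧ l < x then (x - 1, y)
  else if x = l ∧ b < y then (x, y - 1)
  else (x, y)

-- one iteration of A's inner loop; state = ((x, y), prev, min_num, grid)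
def pvStepA (l b t r : Int) (s : (Int × Int) × Int × Int × Array (Array Int)) :
    (Int × Int) × Int × Int × Array (Array Int) :=
  let m := pvMove l b t r s.1.1 s.1.2
  (m, pvGet2 s.2.2.2 m.2 m.1, min (pvGet2 s.2.2.2 m.2 m.1) s.2.2.1,
   pvSet2 s.2.2.2 m.2 m.1 s.2.1)

def solution (rows : Int) (columns : Int) (queries : List (List Int)) : List Int :=
  (queries.foldl (fun acc q =>
      let b := q.getD 0 0 - 1   -- q[0] … q[3]; exact since Pre_ guarantees 4 ≤ q.length
      let l := q.getD 1 0 - 1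
      let t := q.getD 2 0 - 1
      let r := q.getD 3 0 - 1
      let length := (t - b + 1 + r - l + 1) * 2 - 4
      let res := (PySem.List.pyRange 1 (length + 1) 1).foldl
        (fun s _ => pvStepA l b t r s)
        ((l, b), pvGet2 acc.2 b l, 100001, acc.2)
      (acc.1 ++ [res.2.2.1], res.2.2.2))
    (([] : List Int), pvBuildGrid rows columns)).1

-- ===== PORT B =====
-- the ordered perimeter (y, x) pairs, clockwise from just after the top-left corner
def pvCoords (b l t r : Int) : List (Int × Int) :=
  (PySem.List.pyRange (l + 1) (r + 1) 1).map (fun x => (b, x))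
  ++ (PySem.List.pyRange (b + 1) (t + 1) 1).map (fun y => (y, r))
  ++ (PySem.List.pyRange (r - 1) (l - 1) (-1)).map (fun x => (t, x))
  ++ (PySem.List.pyRange (t - 1) (b - 1) (-1)).map (fun y => (y, l))

def solution_alt (rows : Int) (columns : Int) (queries : List (List Int)) : List Int :=
  (queries.foldl (fun acc q =>
      let b := q.getD 0 0 - 1   -- q[0] … q[3]; exact since Pre_ guarantees 4 ≤ q.length
      let l := q.getD 1 0 - 1
      let t := q.getD 2 0 - 1
      let r := q.getD 3 0 - 1
      let coords := pvCoords b l t r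
      let vals := coords.map (fun c => pvGet2 acc.2 c.1 c.2)
      let mn := (PySem.List.min? (vals ++ [100001]) (fun v => v)).getD 0  -- min(vals+[100001]); the list is never empty
      let rot := PySem.List.slice vals (some (-1)) none ++ PySem.List.slice vals none (some (-1))
      (acc.1 ++ [mn],
       (coords.zip rot).foldl (fun g cv => pvSet2 g cv.1.1 cv.1.2 cv.2) acc.2))
    (([] : List Int), pvBuildGrid rows columns)).1

-- ===== PRECONDITION & SPEC =====
-- Pre_ is the problem's own constraint: a buildable grid (both dimensions nonnegative unless
-- the grid is empty anyway; otherwise A's fill loop raises IndexError) and queries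
-- [y1,x1,y2,x2] naming a proper (≥2×2) in-range rectangle.  It excludes malformed queries on
-- which A still returns a value by accident: out-of-range coordinates resolved by Python's
-- negative-index wraparound, and degenerate rectangles (y1 ≥ y2 or x1 ≥ x2) on which A's stuck
-- directional state machine walks the same row twice; both are artefacts of A's
-- implementation, not intended behaviour.
def Pre_solution (rows : Int) (columns : Int) (queries : List (List Int)) : Prop :=
  (rows * columns ≤ 0 ∨ (0 ≤ rows ∧ 0 ≤ columns)) ∧ ∀ q ∈ queries, 4 ≤ q.length ∧
    1 ≤ q.getD 0 0 ∧ q.getD 0 0 < q.getD 2 0 ∧ q.getD 2 0 ≤ rows ∧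
    1 ≤ q.getD 1 0 ∧ q.getD 1 0 < q.getD 3 0 ∧ q.getD 3 0 ≤ columns
instance (rows : Int) (columns : Int) (queries : List (List Int)) : Decidable (Pre_solution rows columns queries) := by
  unfold Pre_solution; infer_instance

def pvWitness_solution : Int × Int × List (List Int) := (2, 3, [[1, 1, 2, 3]])

def Spec_solution (rows : Int) (columns : Int) (queries : List (List Int)) (out : List Int) : Prop :=
  out = solution_alt rows columns queries
instance (rows : Int) (columns : Int) (queries : List (List Int)) (out : List Int) : Decidable (Spec_solution rows columns queries out) := by
  unfold Spec_solution; infer_instance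

-- ===== CLAIM (what is proved, stated in full; the proofs are below) =====
def Claim_equal_solution : Prop := ∀ (rows : Int) (columns : Int) (queries : List (List Int)), Dom_solution rows columns queries → Pre_solution rows columns queries → Spec_solution rows columns queries (solution rows columns queries)

-- ===== LEMMAS AND PROOFS =====

-- the coordinates A's walk visits (in visit order), then A's end position, then the
-- generic read/min/write threading along a coordinate list
def pvPath (l b t r : Int) : Nat → Int → Int → List (Int × Int)
  | 0, _, _ => []
  | n + 1, x, y =>
    ((pvMove l b t r x y).2, (pvMove l b t r x y).1)
      :: pvPath l b t r n (pvMove l b t r x y).1 (pvMove l b t r x y).2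
def pvEnd (l b t r : Int) : Nat → Int × Int → Int × Int
  | 0, xy => xy
  | n + 1, xy => pvEnd l b t r n (pvMove l b t r xy.1 xy.2)
def pvWalk : List (Int × Int) → Int → Int → Array (Array Int) → Int × Int × Array (Array Int)
  | [], prev, mn, g => (prev, mn, g)
  | c :: cs, prev, mn, g =>
    pvWalk cs (pvGet2 g c.1 c.2) (min (pvGet2 g c.1 c.2) mn) (pvSet2 g c.1 c.2 prev)

theorem pvGet2_pvSet2_ne (g : Array (Array Int)) (y x y' x' v : Int)
    (hy : 0 ≤ y) (hx : 0 ≤ x) (hy' : 0 ≤ y') (hx' : 0 ≤ x')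
    (hne : (y, x) ≠ (y', x')) : pvGet2 (pvSet2 g y x v) y' x' = pvGet2 g y' x' := by
  simp only [pvGet2, pvSet2, Array.getD_eq_getD_getElem?, Array.getElem?_modify]
  by_cases hyy : y.toNat = y'.toNat
  · have hxx : x.toNat ≠ x'.toNat := by
      have : x ≠ x' := fun hxe => hne (by rw [show y = y' from by omega, hxe])
      omega
    rw [if_pos hyy]
    cases hrow : g[y'.toNat]? with
    | none => rfl
    | some row =>
      simp only [Option.map_some, Option.getD_some, Array.getElem?_setIfInBounds, if_neg hxx]
  · rw [if_neg hyy]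

theorem stepA_eq_walk (l b t r : Int) :
    ∀ (n : Nat) (xy : Int × Int) (prev mn : Int) (g : Array (Array Int)),
      (pvStepA l b t r)^[n] (xy, prev, mn, g)
        = (pvEnd l b t r n xy, pvWalk (pvPath l b t r n xy.1 xy.2) prev mn g) := by
  intro n
  induction n with
  | zero => intro xy prev mn g; simp [pvEnd, pvPath, pvWalk]
  | succ n ih =>
    intro xy prev mn g
    rw [Function.iterate_succ_apply]
    have hstep : pvStepA l b t r (xy, prev, mn, g)
        = (pvMove l b t r xy.1 xy.2,
           pvGet2 g (pvMove l b t r xy.1 xy.2).2 (pvMove l b t r xy.1 xy.2).1,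
           min (pvGet2 g (pvMove l b t r xy.1 xy.2).2 (pvMove l b t r xy.1 xy.2).1) mn,
           pvSet2 g (pvMove l b t r xy.1 xy.2).2 (pvMove l b t r xy.1 xy.2).1 prev) := rfl
    rw [hstep, ih]
    simp [pvEnd, pvPath, pvWalk]

-- segment lemmas
theorem seg_top (l b t r : Int) : ∀ (k : Nat) (x : Int), l ≤ x → x + k = r → ∀ n,
    pvPath l b t r (k + n) x b
      = (PySem.List.pyRange (x + 1) (r + 1) 1).map (fun x => (b, x)) ++ pvPath l b t r n r b := by
  intro k
  induction k with
  | zero => intro x _ hx n; simp at hx; subst hx; simp [PySem.List.pyRange_one_eq_nil (by omega : r + 1 ≤ r + 1)]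
  | succ k ih =>
    intro x hlx hx n
    have hxr : x < r := by omega
    have hmove : pvMove l b t r x b = (x + 1, b) := by
      simp [pvMove, hxr]
    rw [show (k+1+n : Nat) = (k+n)+1 from by omega]
    simp only [pvPath, hmove]
    rw [ih (x+1) (by omega) (by omega) n]
    rw [PySem.List.pyRange_one_cons (by omega : x + 1 < r + 1)]
    simp

theorem seg_right (l b t r : Int) : ∀ (k : Nat) (y : Int), b ≤ y → y + k = t → ∀ n,
    pvPath l b t r (k + n) r y
      = (PySem.List.pyRange (y + 1) (t + 1) 1).map (fun y => (y, r)) ++ pvPath l b t r n r t := by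
  intro k
  induction k with
  | zero => intro y _ hy n; simp at hy; subst hy; simp [PySem.List.pyRange_one_eq_nil (by omega : t + 1 ≤ t + 1)]
  | succ k ih =>
    intro y hby hy n
    have hyt : y < t := by omega
    have hmove : pvMove l b t r r y = (r, y + 1) := by
      simp [pvMove, hyt]
    rw [show (k+1+n : Nat) = (k+n)+1 from by omega]
    simp only [pvPath, hmove]
    rw [ih (y+1) (by omega) (by omega) n]
    rw [PySem.List.pyRange_one_cons (by omega : y + 1 < t + 1)]
    simp

theorem seg_bottom (l b t r : Int) (hbt : b < t) : ∀ (k : Nat) (x : Int), x ≤ r → l + k = x → ∀ n,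
    pvPath l b t r (k + n) x t
      = (PySem.List.pyRange (x - 1) (l - 1) (-1)).map (fun x => (t, x)) ++ pvPath l b t r n l t := by
  intro k
  induction k with
  | zero => intro x _ hx n; simp at hx; subst hx; simp [PySem.List.pyRange_neg_one_eq_nil (by omega : l - 1 ≤ l - 1)]
  | succ k ih =>
    intro x hxr hx n
    have hlx : l < x := by omega
    have hmove : pvMove l b t r x t = (x - 1, t) := by
      have h1 : ¬ (t = b) := by omega
      simp [pvMove, h1, hlx]
    rw [show (k+1+n : Nat) = (k+n)+1 from by omega]
    simp only [pvPath, hmove]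
    rw [ih (x-1) (by omega) (by omega) n]
    rw [PySem.List.pyRange_neg_one_cons (by omega : l - 1 < x - 1)]
    simp

theorem seg_left (l b t r : Int) (hlr : l < r) : ∀ (k : Nat) (y : Int), y ≤ t → b + k = y → ∀ n,
    pvPath l b t r (k + n) l y
      = (PySem.List.pyRange (y - 1) (b - 1) (-1)).map (fun y => (y, l)) ++ pvPath l b t r n l b := by
  intro k
  induction k with
  | zero => intro y _ hy n; simp at hy; subst hy; simp [PySem.List.pyRange_neg_one_eq_nil (by omega : b - 1 ≤ b - 1)]
  | succ k ih =>
    intro y hyt hy n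
    have hby : b < y := by omega
    have hmove : pvMove l b t r l y = (l, y - 1) := by
      have h1 : ¬ (y = b) := by omega
      have h2 : ¬ (l = r) := by omega
      simp [pvMove, h1, h2, hby]
    rw [show (k+1+n : Nat) = (k+n)+1 from by omega]
    simp only [pvPath, hmove]
    rw [ih (y-1) (by omega) (by omega) n]
    rw [PySem.List.pyRange_neg_one_cons (by omega : b - 1 < y - 1)]
    simp

theorem path_eq_coords (l b t r : Int) (hbt : b < t) (hlr : l < r) :
    pvPath l b t r ((r - l).toNat + ((t - b).toNat + ((r - l).toNat + (t - b).toNat))) l b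
      = pvCoords b l t r := by
  rw [seg_top l b t r (r - l).toNat l (le_refl l) (by omega)]
  rw [seg_right l b t r (t - b).toNat b (le_refl b) (by omega)]
  rw [show ((r - l).toNat + (t - b).toNat : Nat) = (r - l).toNat + ((t - b).toNat + 0) from by omega]
  rw [seg_bottom l b t r hbt (r - l).toNat r (le_refl r) (by omega)]
  rw [seg_left l b t r hlr (t - b).toNat t (le_refl t) (by omega) 0]
  simp [pvPath, pvCoords]

theorem coords_nonneg (b l t r : Int) (hb : 0 ≤ b) (hl : 0 ≤ l) (hbt : b < t) (hlr : l < r) :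
    ∀ p ∈ pvCoords b l t r, 0 ≤ p.1 ∧ 0 ≤ p.2 := by
  intro p hp
  simp only [pvCoords, List.mem_append, List.mem_map] at hp
  rcases hp with ((⟨x, hx, rfl⟩ | ⟨y, hy, rfl⟩) | ⟨x, hx, rfl⟩) | ⟨y, hy, rfl⟩
  · rw [PySem.List.mem_pyRange_one] at hx; constructor <;> simp <;> omega
  · rw [PySem.List.mem_pyRange_one] at hy; constructor <;> simp <;> omega
  · rw [PySem.List.mem_pyRange_iff_of_neg (by omega)] at hx; constructor <;> simp <;> omega
  · rw [PySem.List.mem_pyRange_iff_of_neg (by omega)] at hy; constructor <;> simp <;> omega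

theorem nodup_pyRange_neg_one (a c : Int) : (PySem.List.pyRange a c (-1)).Nodup := by
  rw [PySem.List.pyRange_neg_one_eq_reverse]
  exact List.nodup_reverse.mpr (PySem.List.nodup_pyRange_one _ _)

theorem coords_nodup (b l t r : Int) (hbt : b < t) (hlr : l < r) :
    (pvCoords b l t r).Nodup := by
  have inj1 : Function.Injective (fun x : Int => ((b, x) : Int × Int)) := by
    intro u v h; simpa using h
  have inj2 : Function.Injective (fun y : Int => ((y, r) : Int × Int)) := by
    intro u v h; simpa using h
  have inj3 : Function.Injective (fun x : Int => ((t, x) : Int × Int)) := by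
    intro u v h; simpa using h
  have inj4 : Function.Injective (fun y : Int => ((y, l) : Int × Int)) := by
    intro u v h; simpa using h
  have hA : ∀ p : Int × Int, p ∈ (PySem.List.pyRange (l + 1) (r + 1) 1).map (fun x => ((b, x) : Int × Int)) →
      p.1 = b ∧ l + 1 ≤ p.2 ∧ p.2 ≤ r := by
    intro p hp; simp only [List.mem_map] at hp; obtain ⟨x, hx, rfl⟩ := hp
    rw [PySem.List.mem_pyRange_one] at hx; exact ⟨rfl, by omega, by omega⟩
  have hB : ∀ p : Int × Int, p ∈ (PySem.List.pyRange (b + 1) (t + 1) 1).map (fun y => ((y, r) : Int × Int)) →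
      p.2 = r ∧ b + 1 ≤ p.1 ∧ p.1 ≤ t := by
    intro p hp; simp only [List.mem_map] at hp; obtain ⟨y, hy, rfl⟩ := hp
    rw [PySem.List.mem_pyRange_one] at hy; exact ⟨rfl, by omega, by omega⟩
  have hC : ∀ p : Int × Int, p ∈ (PySem.List.pyRange (r - 1) (l - 1) (-1)).map (fun x => ((t, x) : Int × Int)) →
      p.1 = t ∧ l ≤ p.2 ∧ p.2 ≤ r - 1 := by
    intro p hp; simp only [List.mem_map] at hp; obtain ⟨x, hx, rfl⟩ := hp
    rw [PySem.List.mem_pyRange_iff_of_neg (by omega)] at hx; exact ⟨rfl, by omega, by omega⟩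
  have hD : ∀ p : Int × Int, p ∈ (PySem.List.pyRange (t - 1) (b - 1) (-1)).map (fun y => ((y, l) : Int × Int)) →
      p.2 = l ∧ b ≤ p.1 ∧ p.1 ≤ t - 1 := by
    intro p hp; simp only [List.mem_map] at hp; obtain ⟨y, hy, rfl⟩ := hp
    rw [PySem.List.mem_pyRange_iff_of_neg (by omega)] at hy; exact ⟨rfl, by omega, by omega⟩
  have nCD : ((PySem.List.pyRange (r - 1) (l - 1) (-1)).map (fun x => ((t, x) : Int × Int))
      ++ (PySem.List.pyRange (t - 1) (b - 1) (-1)).map (fun y => ((y, l) : Int × Int))).Nodup := by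
    refine ((nodup_pyRange_neg_one _ _).map inj3).append ((nodup_pyRange_neg_one _ _).map inj4) ?_
    intro p hp hp'
    have := hC p hp; have := hD p hp'; omega
  have nBCD : ((PySem.List.pyRange (b + 1) (t + 1) 1).map (fun y => ((y, r) : Int × Int))
      ++ ((PySem.List.pyRange (r - 1) (l - 1) (-1)).map (fun x => ((t, x) : Int × Int))
      ++ (PySem.List.pyRange (t - 1) (b - 1) (-1)).map (fun y => ((y, l) : Int × Int)))).Nodup := by
    refine ((PySem.List.nodup_pyRange_one _ _).map inj2).append nCD ?_
    intro p hp hp'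
    rw [List.mem_append] at hp'
    have := hB p hp
    rcases hp' with h | h
    · have := hC p h; omega
    · have := hD p h; omega
  unfold pvCoords
  rw [List.append_assoc, List.append_assoc]
  refine ((PySem.List.nodup_pyRange_one _ _).map inj1).append nBCD ?_
  intro p hp hp'
  rw [List.mem_append, List.mem_append] at hp'
  have := hA p hp
  rcases hp' with h | h | h
  · have := hB p h; omega
  · have := hC p h; omega
  · have := hD p h; omega

theorem walk_spec :
    ∀ (c : List (Int × Int)) (g : Array (Array Int)) (prev mn : Int),
      c.Nodup → (∀ p ∈ c, 0 ≤ p.1 ∧ 0 ≤ p.2) →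
      pvWalk c prev mn g =
        ((c.map (fun p => pvGet2 g p.1 p.2)).getLastD prev,
         (c.map (fun p => pvGet2 g p.1 p.2)).foldl (fun m v => min v m) mn,
         (c.zip (prev :: c.map (fun p => pvGet2 g p.1 p.2))).foldl
           (fun g cv => pvSet2 g cv.1.1 cv.1.2 cv.2) g) := by
  intro c
  induction c with
  | nil => intro g prev mn _ _; simp [pvWalk]
  | cons p cs ih =>
    intro g prev mn hnd hnn
    have hpnn := hnn p (by simp)
    have hmem : p ∉ cs := (List.nodup_cons.mp hnd).1
    have hreads : cs.map (fun q => pvGet2 (pvSet2 g p.1 p.2 prev) q.1 q.2)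
        = cs.map (fun q => pvGet2 g q.1 q.2) := by
      apply List.map_congr_left
      intro q hq
      have hqnn := hnn q (by simp [hq])
      apply pvGet2_pvSet2_ne
      · exact hpnn.1
      · exact hpnn.2
      · exact hqnn.1
      · exact hqnn.2
      · intro hcontra
        apply hmem
        have : p = q := by
          obtain ⟨h1, h2⟩ := Prod.mk.injEq .. ▸ (by exact hcontra : (p.1, p.2) = (q.1, q.2))
          exact Prod.ext h1 h2
        rw [this]; exact hq
    show pvWalk cs (pvGet2 g p.1 p.2) (min (pvGet2 g p.1 p.2) mn) (pvSet2 g p.1 p.2 prev) = _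
    rw [ih (pvSet2 g p.1 p.2 prev) (pvGet2 g p.1 p.2) (min (pvGet2 g p.1 p.2) mn)
      (List.nodup_cons.mp hnd).2 (fun q hq => hnn q (by simp [hq]))]
    rw [hreads]
    simp only [List.map_cons, List.zip_cons_cons, List.foldl_cons, List.getLastD_cons]

theorem foldl_min_shift : ∀ (vs : List Int) (a c : Int),
    min (vs.foldl min a) c = vs.foldl min (min a c) := by
  intro vs
  induction vs with
  | nil => intro a c; rfl
  | cons w vs ih =>
    intro a c
    simp only [List.foldl_cons]
    rw [ih (min a w) c, min_right_comm a c w]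

theorem foldl_flip_min (vs : List Int) (a : Int) :
    vs.foldl (fun m v => min v m) a = vs.foldl min a := by
  exact PySem.List.foldl_congr_mem vs _ _ a (fun acc x _ => min_comm x acc)

theorem min_getD_eq (vals : List Int) :
    (PySem.List.min? (vals ++ [100001]) (fun y => y)).getD 0
      = vals.foldl (fun m v => min v m) 100001 := by
  cases vals with
  | nil => decide
  | cons v vs =>
    rw [List.cons_append, PySem.List.min?_id_cons, Option.getD_some]
    rw [List.foldl_append]
    simp only [List.foldl_cons, List.foldl_nil]
    rw [foldl_min_shift vs v 100001, foldl_flip_min, min_comm v 100001]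

theorem zip_take {α β : Type} : ∀ (c : List α) (v : List β), c.zip v = c.zip (v.take c.length) := by
  intro c
  induction c with
  | nil => intro v; simp
  | cons a c ih =>
    intro v
    cases v with
    | nil => simp
    | cons w v => simp only [List.length_cons, List.take_succ_cons, List.zip_cons_cons]; rw [← ih v, ih v]
      
theorem left_decomp (b t : Int) (hbt : b < t) :
    PySem.List.pyRange (t - 1) (b - 1) (-1) = PySem.List.pyRange (t - 1) b (-1) ++ [b] := by
  rw [PySem.List.pyRange_neg_one_eq_reverse, PySem.List.pyRange_neg_one_eq_reverse]
  rw [show b - 1 + 1 = b from by omega, show b + 1 = b + 1 from rfl]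
  rw [PySem.List.pyRange_one_cons (by omega : b < t - 1 + 1)]
  simp

theorem coords_concat (b l t r : Int) (hbt : b < t) :
    ∃ c', pvCoords b l t r = c' ++ [(b, l)] := by
  refine ⟨(PySem.List.pyRange (l + 1) (r + 1) 1).map (fun x => (b, x))
    ++ (PySem.List.pyRange (b + 1) (t + 1) 1).map (fun y => (y, r))
    ++ (PySem.List.pyRange (r - 1) (l - 1) (-1)).map (fun x => (t, x))
    ++ (PySem.List.pyRange (t - 1) b (-1)).map (fun y => (y, l)), ?_⟩
  unfold pvCoords
  rw [left_decomp b t hbt]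
  simp

theorem rot_zip_eq (b l t r : Int) (hbt : b < t) (g : Array (Array Int)) :
    (pvCoords b l t r).zip
        (pvGet2 g b l :: (pvCoords b l t r).map (fun p => pvGet2 g p.1 p.2))
      = (pvCoords b l t r).zip
        (PySem.List.slice ((pvCoords b l t r).map (fun p => pvGet2 g p.1 p.2)) (some (-1)) none
          ++ PySem.List.slice ((pvCoords b l t r).map (fun p => pvGet2 g p.1 p.2)) none (some (-1))) := by
  obtain ⟨c', hc⟩ := coords_concat b l t r hbt
  rw [hc]
  set w := pvGet2 g b l with hw
  have hmap : ((c' ++ [(b, l)]).map (fun p => pvGet2 g p.1 p.2))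
      = c'.map (fun p => pvGet2 g p.1 p.2) ++ [w] := by simp [hw]
  rw [hmap]
  set vals' := c'.map (fun p => pvGet2 g p.1 p.2) with hv
  rw [PySem.List.slice_from_neg_one, PySem.List.slice_to_neg_one]
  rw [show (vals' ++ [w]).length - 1 = vals'.length from by simp]
  rw [List.drop_left, List.dropLast_concat]
  rw [zip_take (c' ++ [(b, l)]) (w :: (vals' ++ [w])), zip_take (c' ++ [(b, l)]) ([w] ++ vals')]
  have hlen : (c' ++ [(b, l)]).length = vals'.length + 1 := by simp [hv]
  rw [hlen]
  simp only [List.take_succ_cons, List.singleton_append]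
  rw [List.take_left', List.take_of_length_le (by simp)]
  exact rfl

theorem foldl_const_eq_iterate {α β : Type} (xs : List α) (f : β → β) (s : β) :
    xs.foldl (fun s _ => f s) s = f^[xs.length] s := by
  induction xs generalizing s with
  | nil => rfl
  | cons a xs ih => simp [List.foldl_cons, ih, Function.iterate_succ_apply]

theorem query_eq (b l t r : Int) (hb : 0 ≤ b) (hl : 0 ≤ l) (hbt : b < t) (hlr : l < r)
    (acc : List Int × Array (Array Int)) :
    (let length := (t - b + 1 + r - l + 1) * 2 - 4
     let res := (PySem.List.pyRange 1 (length + 1) 1).foldl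
       (fun s _ => pvStepA l b t r s)
       ((l, b), pvGet2 acc.2 b l, 100001, acc.2)
     ((acc.1 ++ [res.2.2.1], res.2.2.2) : List Int × Array (Array Int)))
    = (let coords := pvCoords b l t r
       let vals := coords.map (fun c => pvGet2 acc.2 c.1 c.2)
       let mn := (PySem.List.min? (vals ++ [100001]) (fun v => v)).getD 0
       let rot := PySem.List.slice vals (some (-1)) none ++ PySem.List.slice vals none (some (-1))
       (acc.1 ++ [mn],
        (coords.zip rot).foldl (fun g cv => pvSet2 g cv.1.1 cv.1.2 cv.2) acc.2)) := by
  dsimp only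
  rw [foldl_const_eq_iterate, PySem.List.length_pyRange_one]
  rw [show ((t - b + 1 + r - l + 1) * 2 - 4 + 1 - 1).toNat
      = (r - l).toNat + ((t - b).toNat + ((r - l).toNat + (t - b).toNat)) from by omega]
  rw [stepA_eq_walk]
  rw [show ((l, b) : Int × Int).1 = l from rfl, show ((l, b) : Int × Int).2 = b from rfl]
  rw [path_eq_coords l b t r hbt hlr]
  rw [walk_spec _ acc.2 _ _ (coords_nodup b l t r hbt hlr) (coords_nonneg b l t r hb hl hbt hlr)]
  rw [min_getD_eq, ← rot_zip_eq b l t r hbt acc.2]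

-- ===== VERDICT (by name: the statement is the Claim_ definition above) =====
theorem solution_spec : Claim_equal_solution := by
  intro rows columns queries _hdom hpre
  unfold Spec_solution solution solution_alt
  obtain ⟨_, hq⟩ := hpre
  have h := PySem.List.foldl_congr_mem (l := queries)
    (init := (([] : List Int), pvBuildGrid rows columns))
    (f := fun acc q =>
      let b := q.getD 0 0 - 1
      let l := q.getD 1 0 - 1
      let t := q.getD 2 0 - 1
      let r := q.getD 3 0 - 1
      let length := (t - b + 1 + r - l + 1) * 2 - 4
      let res := (PySem.List.pyRange 1 (length + 1) 1).foldl
        (fun s _ => pvStepA l b t r s)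
        ((l, b), pvGet2 acc.2 b l, 100001, acc.2)
      (acc.1 ++ [res.2.2.1], res.2.2.2))
    (g := fun acc q =>
      let b := q.getD 0 0 - 1
      let l := q.getD 1 0 - 1
      let t := q.getD 2 0 - 1
      let r := q.getD 3 0 - 1
      let coords := pvCoords b l t r
      let vals := coords.map (fun c => pvGet2 acc.2 c.1 c.2)
      let mn := (PySem.List.min? (vals ++ [100001]) (fun v => v)).getD 0
      let rot := PySem.List.slice vals (some (-1)) none ++ PySem.List.slice vals none (some (-1))
      (acc.1 ++ [mn],
       (coords.zip rot).foldl (fun g cv => pvSet2 g cv.1.1 cv.1.2 cv.2) acc.2))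
    (by
      intro acc q hmem
      obtain ⟨_, h0, h02, _, h1, h13, _⟩ := hq q hmem
      exact query_eq (q.getD 0 0 - 1) (q.getD 1 0 - 1) (q.getD 2 0 - 1) (q.getD 3 0 - 1)
        (by omega) (by omega) (by omega) (by omega) acc)
  rw [h]
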